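-- pv_equiv track=rewrite | github.com/vaniok56/ORAR_UTM_FCIM_BOT | functions.py | extract_specs
-- ===== SOURCE A (Python) =====
-- def extract_specs(groups):
--     specs = {}
--     spec_order = []  # To preserve original order
--     for group in groups:
--         spec = group[:-4]  # Extract specialty part (e.g., "TI" from "TI-241")
--         if spec not in specs:
--             specs[spec] = []
--             spec_order.append(spec)
--         specs[spec].append(group)
--     return specs, spec_order
-- ===== SOURCE B (Python) =====
-- def extract_specs(groups):
--     # Staged: pass 1 computes the distinct prefixes in first-appearance order,
--     # pass 2 collects each prefix's groups by filtering the whole list per prefix.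
--     order = list(dict.fromkeys(g[:-4] for g in groups))
--     specs = {s: [g for g in groups if g[:-4] == s] for s in order}
--     return specs, order
-- ===== Notes on version B (the rewrite author's own statement) =====
-- stated objective: alternative
-- what changed: B replaces A's single-pass accumulation (mutating a dict and an order list per element with a membership branch) by two staged passes: first dedup the sliced prefixes via dict.fromkeys to get the order, then a dict comprehension that builds each group's list by filtering the whole input per prefix.
import Mathlib
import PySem

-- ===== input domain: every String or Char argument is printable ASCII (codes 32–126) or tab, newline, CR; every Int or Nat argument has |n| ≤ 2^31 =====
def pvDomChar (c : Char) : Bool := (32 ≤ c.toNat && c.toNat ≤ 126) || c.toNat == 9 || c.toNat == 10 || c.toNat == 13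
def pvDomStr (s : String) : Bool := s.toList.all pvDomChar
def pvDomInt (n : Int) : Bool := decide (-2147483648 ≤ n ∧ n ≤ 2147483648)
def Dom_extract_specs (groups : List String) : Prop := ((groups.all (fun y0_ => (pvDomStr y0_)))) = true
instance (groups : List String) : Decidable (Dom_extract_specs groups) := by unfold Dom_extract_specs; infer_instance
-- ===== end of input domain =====

-- B replaces A's single-pass dict+order accumulation by two staged passes: dedup the key list first, then build each group by filtering per key (alternative decomposition, not faster).


-- ===== PORT A =====
-- loop state: (specs dict, spec_order list)
def extract_specs (groups : List String) : (List (String × List String)) × List String :=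
  let st := groups.foldl
    (fun (st : PySem.Dict String (List String) × List String) group =>
      let spec := PySem.Str.slice group none (some (-4))
      let st := if st.1.contains spec then st else (st.1.insert spec [], st.2 ++ [spec])
      (st.1.modify spec [] (fun l => l ++ [group]), st.2))
    (PySem.Dict.empty, [])
  (st.1.items, st.2)

-- ===== PORT B =====
-- pass 1: distinct prefixes in first-appearance order (dict.fromkeys = PySem.List.dedup);
-- pass 2: dict comprehension over those (distinct) keys — its items are exactly this map
def extract_specs_alt (groups : List String) : (List (String × List String)) × List String :=
  let order := PySem.List.dedup (groups.map (fun g => PySem.Str.slice g none (some (-4))))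
  let specs := order.map
    (fun s => (s, groups.filter (fun g => PySem.Str.slice g none (some (-4)) == s)))
  (specs, order)

-- ===== PRECONDITION & SPEC =====
def Spec_extract_specs (groups : List String) (out : (List (String × List String)) × List String) : Prop := out = extract_specs_alt groups
instance (groups : List String) (out : (List (String × List String)) × List String) : Decidable (Spec_extract_specs groups out) := by unfold Spec_extract_specs; infer_instance

-- ===== CLAIM (what is proved, stated in full; the proofs are below) =====
def Claim_equal_extract_specs : Prop := ∀ (groups : List String), Dom_extract_specs groups → Spec_extract_specs groups (extract_specs groups)

-- ===== LEMMAS AND PROOFS =====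

-- g[:-4]
def pvKey (g : String) : String := PySem.Str.slice g none (some (-4))
-- the distinct keys of a processed prefix p, in first-appearance order
def pvOrd (p : List String) : List String := PySem.List.dedup (p.map pvKey)
-- A's dict after processing prefix p, in closed form
def pvDict (p : List String) : PySem.Dict String (List String) :=
  PySem.Dict.mk ((pvOrd p).map (fun s => (s, p.filter (fun g => pvKey g == s))))

-- one iteration of A's loop
def pvStepA (st : PySem.Dict String (List String) × List String) (group : String) :
    PySem.Dict String (List String) × List String :=
  let spec := PySem.Str.slice group none (some (-4))
  let st := if st.1.contains spec then st else (st.1.insert spec [], st.2 ++ [spec])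
  (st.1.modify spec [] (fun l => l ++ [group]), st.2)

theorem pvContains_pvDict (p : List String) (s : String) :
    (pvDict p).contains s = decide (s ∈ pvOrd p) := by
  simp [pvDict, PySem.Dict.contains, List.any_map, Function.comp_def,
    List.any_beq', List.contains_eq_mem]

theorem pvKeys_pvDict (p : List String) : (pvDict p).keys = pvOrd p := by
  simp [pvDict, PySem.Dict.keys, List.map_map, Function.comp_def]

theorem pvNodup_keys_pvDict (p : List String) : (pvDict p).keys.Nodup := by
  rw [pvKeys_pvDict]; exact PySem.Set.nodup_ofList _

theorem pvGetD (p : List String) (s : String) (hs : s ∈ pvOrd p) :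
    (pvDict p).getD s [] = p.filter (fun g => pvKey g == s) := by
  apply PySem.Dict.getD_of_mem_items _ _ (pvNodup_keys_pvDict p)
  exact List.mem_map_of_mem hs

theorem pvStep (p : List String) (g : String) :
    pvStepA (pvDict p, pvOrd p) g = (pvDict (p ++ [g]), pvOrd (p ++ [g])) := by
  have hord : pvOrd (p ++ [g]) =
      if pvKey g ∈ pvOrd p then pvOrd p else pvOrd p ++ [pvKey g] := by
    simp only [pvOrd, List.map_append, List.map_cons, List.map_nil,
      PySem.List.dedup, PySem.Set.ofList_append_singleton]
    rw [PySem.Set.add_eq_ite]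
  by_cases hc : pvKey g ∈ pvOrd p
  · -- key already present: order unchanged, the key's list gets g appended
    simp only [pvStepA, pvContains_pvDict,
      show PySem.Str.slice g none (some (-4)) = pvKey g from rfl, hc, decide_true, if_true]
    rw [hord, if_pos hc]
    refine Prod.ext ?_ rfl
    show (pvDict p).modify (pvKey g) [] (fun l => l ++ [g]) = pvDict (p ++ [g])
    rw [PySem.Dict.modify, pvGetD p _ hc]
    apply PySem.Dict.ext
    rw [PySem.Dict.items_insert_of_contains _ _ (by rw [pvContains_pvDict]; simpa using hc)]
    simp only [pvDict]
    rw [hord, if_pos hc, List.map_map]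
    apply List.map_congr_left
    intro s' hs'
    by_cases h : s' = pvKey g
    · subst h
      simp [List.filter_append, pvKey]
    · simp only [Function.comp_def]
      have hb : (s' == pvKey g) = false := by simpa using h
      simp only [hb, Bool.false_eq_true, if_false]
      have hfg : (pvKey g == s') = false := by simpa using (Ne.symm h)
      simp [List.filter_append, hfg]
  · -- fresh key: appended to the order; its list starts as [g]
    simp only [pvStepA, pvContains_pvDict,
      show PySem.Str.slice g none (some (-4)) = pvKey g from rfl, hc, decide_false,
      Bool.false_eq_true, if_false]
    rw [hord, if_neg hc]
    refine Prod.ext ?_ rfl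
    show ((pvDict p).insert (pvKey g) []).modify (pvKey g) [] (fun l => l ++ [g]) = _
    rw [PySem.Dict.modify, PySem.Dict.getD_insert_self, PySem.Dict.insert_insert_self]
    apply PySem.Dict.ext
    rw [PySem.Dict.items_insert_of_not_contains _ _ (by rw [pvContains_pvDict]; simpa using hc)]
    simp only [pvDict]
    rw [hord, if_neg hc, List.map_append]
    congr 1
    · apply List.map_congr_left
      intro s' hs'
      have hfg : (pvKey g == s') = false := by
        have hne : pvKey g ≠ s' := fun h => hc (h ▸ hs')
        simpa using hne
      simp [List.filter_append, hfg]
    · have hnil : p.filter (fun x => pvKey x == pvKey g) = [] := by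
        rw [List.filter_eq_nil_iff]
        intro a ha hke
        exact hc (by
          simpa [pvOrd, PySem.List.mem_dedup] using ⟨a, ha, (by simpa using hke)⟩)
      simp [List.filter_append, hnil]

theorem pvFold (rest p : List String) :
    rest.foldl pvStepA (pvDict p, pvOrd p) = (pvDict (p ++ rest), pvOrd (p ++ rest)) := by
  induction rest generalizing p with
  | nil => simp
  | cons g gs ih =>
    rw [List.foldl_cons, pvStep, ih]
    simp

theorem pvExtract_eq (groups : List String) :
    extract_specs groups = extract_specs_alt groups := by
  unfold extract_specs
  have h0 : (PySem.Dict.empty, ([] : List String)) = (pvDict [], pvOrd []) := rfl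
  show (let st := groups.foldl pvStepA (PySem.Dict.empty, []); (st.1.items, st.2)) = _
  rw [h0, pvFold groups []]
  rfl

-- ===== VERDICT (by name: the statement is the Claim_ definition above) =====
theorem extract_specs_spec : Claim_equal_extract_specs := by
  intro groups _
  exact pvExtract_eq groups
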